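-- pv_equiv track=rewrite | github.com/Matthias-Rev/Numerical-Computing | mission2_less.py | possible_Parity
-- ===== SOURCE A (Python) =====
-- def possible_Parity(data, r):
--     j=0
--     k=1
--     m=len(data)
--     res=''
--     for i in range(1, m+r+1):
--         if (i== 2**j):
--             res=res+'0'
--             j+=1
--         else:
--             res=res+data[-1*k]
--             k+=1
--     return res[::-1]
-- ===== SOURCE B (Python) =====
-- def possible_Parity(data, r):
--     # mark power-of-2 slots, then fill the remaining slots with data taken from the end
--     N = len(data) + r
--     res = [None] * max(N, 0)
--     p = 1
--     while p <= N:
--         res[p - 1] = '0'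
--         p *= 2
--     k = 1
--     for i in range(len(res)):
--         if res[i] is None:
--             res[i] = data[-k]
--             k += 1
--     return ''.join(res)[::-1]
-- ===== Notes on version B (the rewrite author's own statement) =====
-- stated objective: alternative
-- what changed: A builds the string in one interleaved loop with a running power-of-2 counter; B first marks the power-of-2 slots of an output table with a doubling loop, then fills the remaining slots left-to-right from the tail of data, and joins.
import Mathlib
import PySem

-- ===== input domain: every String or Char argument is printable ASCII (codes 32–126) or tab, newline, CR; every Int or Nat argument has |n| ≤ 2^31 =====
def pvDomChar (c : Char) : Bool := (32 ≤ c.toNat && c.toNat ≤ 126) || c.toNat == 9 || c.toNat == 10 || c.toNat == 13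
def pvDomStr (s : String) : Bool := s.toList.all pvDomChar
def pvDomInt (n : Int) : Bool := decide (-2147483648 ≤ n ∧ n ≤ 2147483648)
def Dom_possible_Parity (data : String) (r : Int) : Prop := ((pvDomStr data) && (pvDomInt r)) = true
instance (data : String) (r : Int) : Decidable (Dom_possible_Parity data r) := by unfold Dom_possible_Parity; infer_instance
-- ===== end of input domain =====

-- B replaces A's single interleaved counter loop by a mark-table-then-fill decomposition (alternative; return value only).


-- ===== PORT A =====
-- literal port of A: one left-to-right loop over i in range(1, m+r+1) with state (j, k, res);
-- data[-1*k] is PySem.Str.pyGet?; where Python raises IndexError the port takes ' ' (those inputs are outside Pre_).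
def possible_Parity (data : String) (r : Int) : String :=
  let m : Int := PySem.Str.len data
  let st :=
    (PySem.List.pyRange 1 (m + r + 1) 1).foldl
      (fun (s : Int × Int × List Char) i =>
        if i = 2 ^ s.1.toNat then (s.1 + 1, s.2.1, s.2.2 ++ ['0'])
        else (s.1, s.2.1 + 1, s.2.2 ++ [(PySem.Str.pyGet? data (-1 * s.2.1)).getD ' ']))
      (0, 1, ([] : List Char))
  String.ofList st.2.2.reverse

-- ===== PORT B =====
-- B's doubling while-loop `p=1; while p<=N: res[p-1]='0'; p*=2` (fuel N.toNat+1 only makes it total: p doubles)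
def pvMark (N : Int) : List (Option Char) → Int → Nat → List (Option Char)
  | res, _, 0 => res
  | res, p, fuel + 1 =>
    if p ≤ N then pvMark N (res.set (p - 1).toNat (some '0')) (p * 2) fuel else res

-- B's fill pass: each still-empty slot gets data[-k], k starting at 1
def pvFill (data : String) : List (Option Char) → Int → List Char
  | [], _ => []
  | some c :: rest, k => c :: pvFill data rest k
  | none :: rest, k => (PySem.Str.pyGet? data (-k)).getD ' ' :: pvFill data rest (k + 1)

def possible_Parity_alt (data : String) (r : Int) : String :=
  let N : Int := PySem.Str.len data + r
  let res0 : List (Option Char) := List.replicate N.toNat none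
  let marked := pvMark N res0 1 (N.toNat + 1)
  String.ofList ((pvFill data marked 1).reverse)

-- ===== PRECONDITION & SPEC =====
-- Pre_ holds exactly where the Python A returns: the number of non-power-of-2 positions in 1..n
-- (that is n - (log2 n + 1) for n ≥ 1) must not exceed len(data); otherwise data[-k] raises IndexError.
def Pre_possible_Parity (data : String) (r : Int) : Prop :=
  let n := (PySem.Str.len data + r).toNat
  n = 0 ∨ n ≤ data.toList.length + (Nat.log2 n + 1)
instance (data : String) (r : Int) : Decidable (Pre_possible_Parity data r) := by unfold Pre_possible_Parity; infer_instance
def pvWitness_possible_Parity : String × Int := ("abc", 2)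

def Spec_possible_Parity (data : String) (r : Int) (out : String) : Prop := out = possible_Parity_alt data r
instance (data : String) (r : Int) (out : String) : Decidable (Spec_possible_Parity data r out) := by unfold Spec_possible_Parity; infer_instance

-- ===== CLAIM (what is proved, stated in full; the proofs are below) =====
def Claim_equal_possible_Parity : Prop := ∀ (data : String) (r : Int), Dom_possible_Parity data r → Pre_possible_Parity data r → Spec_possible_Parity data r (possible_Parity data r)

-- ===== LEMMAS AND PROOFS =====

-- j of A's loop as a function of the number of processed positions
def pc : Nat → Nat
  | 0 => 0
  | n + 1 => pc n + (if n + 1 = 2 ^ pc n then 1 else 0)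

-- the mark table after n positions, built position by position
def ms : Nat → List (Option Char)
  | 0 => []
  | n + 1 => ms n ++ [if n + 1 = 2 ^ pc n then some '0' else none]

lemma pc_le (n : Nat) : pc n ≤ n := by
  induction n with
  | zero => simp [pc]
  | succ n ih => simp only [pc]; split <;> omega

lemma pc_inv (n : Nat) : n < 2 ^ pc n ∧ (pc n = 0 ∨ 2 ^ (pc n - 1) ≤ n) := by
  induction n with
  | zero => simp [pc]
  | succ n ih =>
    obtain ⟨h1, h2⟩ := ih
    simp only [pc]
    by_cases h : n + 1 = 2 ^ pc n
    · simp only [h, if_true]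
      have hp : 2 ^ (pc n + 1) = 2 * 2 ^ pc n := by ring
      refine ⟨by omega, Or.inr ?_⟩
      simp only [Nat.add_sub_cancel, ← h]
      omega
    · simp only [if_neg h, add_zero]
      exact ⟨by omega, h2.imp id (fun hh => by omega)⟩
lemma pow_iff (n : Nat) : (∃ s, n + 1 = 2 ^ s) ↔ n + 1 = 2 ^ pc n := by
  constructor
  · rintro ⟨s, hs⟩
    obtain ⟨h1, h2⟩ := pc_inv n
    rcases h2 with h0 | h2
    · rw [h0] at h1 ⊢; simp at h1 ⊢; omega
    · have hts : pc n ≤ s := by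
        by_contra hc
        rw [Nat.not_le] at hc
        have : 2 ^ s ≤ 2 ^ (pc n - 1) := Nat.pow_le_pow_right (by norm_num) (by omega)
        omega
      have : 2 ^ pc n ≤ 2 ^ s := Nat.pow_le_pow_right (by norm_num) hts
      omega
  · intro h; exact ⟨pc n, h⟩
lemma ms_length (n : Nat) : (ms n).length = n := by
  induction n with
  | zero => rfl
  | succ n ih => simp [ms, ih]

lemma ms_get? (n q : Nat) (hq : q < n) :
    (ms n)[q]? = some (if q + 1 = 2 ^ pc q then some '0' else none) := by
  induction n with
  | zero => omega
  | succ n ih =>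
    by_cases h : q < n
    · rw [show (ms (n+1)) = ms n ++ [if n + 1 = 2 ^ pc n then some '0' else none] from rfl]
      rw [List.getElem?_append_left (by rw [ms_length]; exact h)]
      exact ih h
    · have hqn : q = n := by omega
      subst hqn
      rw [show (ms (q+1)) = ms q ++ [if q + 1 = 2 ^ pc q then some '0' else none] from rfl]
      rw [List.getElem?_append_right (by simp [ms_length])]
      simp [ms_length]
lemma ms_count (n : Nat) : (ms n).countP (fun o => o.isNone) = n - pc n := by
  induction n with
  | zero => rfl
  | succ n ih =>
    have hle := pc_le n
    by_cases h : n + 1 = 2 ^ pc n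
    · simp only [ms, List.countP_append, ih, pc, if_pos h]
      simp
    · simp only [ms, List.countP_append, ih, pc, if_neg h]
      simp
      omega
lemma fill_append_some (data : String) (l : List (Option Char)) (c : Char) :
    ∀ k, pvFill data (l ++ [some c]) k = pvFill data l k ++ [c] := by
  induction l with
  | nil => intro k; rfl
  | cons x rest ih =>
    intro k
    cases x <;> simp only [List.cons_append, pvFill, ih]
lemma fill_append_none (data : String) (l : List (Option Char)) :
    ∀ k, pvFill data (l ++ [none]) k =
      pvFill data l k ++ [(PySem.Str.pyGet? data (-(k + ((l.countP (fun o => o.isNone) : Nat) : Int)))).getD ' '] := by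
  induction l with
  | nil => intro k; simp [pvFill]
  | cons x rest ih =>
    intro k
    cases x with
    | none =>
      simp only [List.cons_append, pvFill, ih, List.countP_cons, Option.isNone_none]
      have h2 : (-(k + 1 + ((rest.countP (fun o => o.isNone) : Nat) : Int)))
          = -(k + (((rest.countP (fun o => o.isNone) : Nat) + if True then 1 else 0 : Nat) : Int)) := by
        push_cast; ring
      rw [h2]
    | some c =>
      simp only [List.cons_append, pvFill, ih, List.countP_cons, Option.isNone_some]
      norm_num
lemma pvMark_length (N : Int) : ∀ fuel res p, (pvMark N res p fuel).length = res.length := by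
  intro fuel
  induction fuel with
  | zero => intro res p; rfl
  | succ fuel ih =>
    intro res p
    simp only [pvMark]
    split
    · rw [ih]; simp
    · rfl

lemma pvMark_get (N : Int) :
    ∀ (fuel : Nat) (res : List (Option Char)) (t : Nat) (p : Int),
      p = ((2 ^ t : Nat) : Int) → N < ((2 ^ t * 2 ^ fuel : Nat) : Int) →
      ∀ q, q < res.length →
        (pvMark N res p fuel)[q]? =
          if (∃ s, s < q + 1 ∧ t ≤ s ∧ q + 1 = 2 ^ s) ∧ ((q : Int) + 1 ≤ N) then some (some '0')
          else res[q]? := by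
  intro fuel
  induction fuel with
  | zero =>
    intro res t p hp hN q hq
    rw [if_neg]
    · rfl
    rintro ⟨⟨s, _, hts, hqs⟩, hqN⟩
    have h1 : (2:Nat) ^ t ≤ 2 ^ s := Nat.pow_le_pow_right (by norm_num) hts
    have h2 : ((q:Int) + 1) = ((2 ^ s : Nat) : Int) := by exact_mod_cast congrArg (Nat.cast : Nat → Int) hqs
    simp only [pow_zero, mul_one] at hN
    omega
  | succ fuel ih =>
    intro res t p hp hN q hq
    simp only [pvMark]
    by_cases hpn : p ≤ N
    · rw [if_pos hpn]
      have hp1 : (1:Nat) ≤ 2 ^ t := Nat.one_le_two_pow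
      have hidx : (p - 1).toNat = 2 ^ t - 1 := by omega
      have hlen : q < (res.set (p - 1).toNat (some '0')).length := by simpa using hq
      rw [ih (res.set (p - 1).toNat (some '0')) (t + 1) (p * 2)
            (by rw [hp]; push_cast [pow_succ]; ring)
            (by have hh : (2:Nat) ^ (t+1) * 2 ^ fuel = 2 ^ t * 2 ^ (fuel+1) := by ring
                exact hh ▸ hN)
            q hlen]
      by_cases hq2 : q + 1 = 2 ^ t
      · -- this is the slot set in this step
        have hnot : ¬ ((∃ s, s < q + 1 ∧ t + 1 ≤ s ∧ q + 1 = 2 ^ s) ∧ ((q : Int) + 1 ≤ N)) := by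
          rintro ⟨⟨s, _, hts, hqs⟩, -⟩
          have := Nat.pow_right_injective (le_refl 2) (hq2 ▸ hqs : (2:Nat) ^ t = 2 ^ s)
          omega
        rw [if_neg hnot, if_pos]
        · have hpq : (p - 1).toNat = q := by omega
          rw [hpq]
          rw [List.getElem?_set_self hq]
        · have hc : ((q:Int) + 1) = ((2 ^ t : Nat) : Int) := by exact_mod_cast congrArg (Nat.cast : Nat → Int) hq2
          have ht2 : t < 2 ^ t := Nat.lt_two_pow_self
          exact ⟨⟨t, by omega, le_refl t, hq2⟩, by omega⟩
      · have hne : (p - 1).toNat ≠ q := by omega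
        rw [List.getElem?_set_ne hne]
        congr 1
        apply propext
        constructor
        · rintro ⟨⟨s, hs1, hts, hqs⟩, hqN⟩
          refine ⟨⟨s, hs1, ?_, hqs⟩, hqN⟩
          omega
        · rintro ⟨⟨s, hs1, hts, hqs⟩, hqN⟩
          refine ⟨⟨s, hs1, ?_, hqs⟩, hqN⟩
          rcases Nat.lt_or_ge s (t + 1) with h | h
          · exfalso
            have hst : s = t := by omega
            exact hq2 (by rw [hqs, hst])
          · omega
    · rw [if_neg hpn, if_neg]
      rintro ⟨⟨s, _, hts, hqs⟩, hqN⟩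
      have h1 : (2:Nat) ^ t ≤ 2 ^ s := Nat.pow_le_pow_right (by norm_num) hts
      have h2 : ((q:Int) + 1) = ((2 ^ s : Nat) : Int) := by exact_mod_cast congrArg (Nat.cast : Nat → Int) hqs
      omega
lemma mark_eq_ms (N : Int) :
    pvMark N (List.replicate N.toNat none) 1 (N.toNat + 1) = ms N.toNat := by
  have hb : N < (((2 ^ 0 * 2 ^ (N.toNat + 1) : Nat)) : Int) := by
    have h1 : N.toNat < 2 ^ N.toNat := Nat.lt_two_pow_self
    have h2 : (2:Nat) ^ N.toNat ≤ 2 ^ (N.toNat + 1) := Nat.pow_le_pow_right (by norm_num) (by omega)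
    have h3 : (2:Nat) ^ 0 * 2 ^ (N.toNat + 1) = 2 ^ (N.toNat + 1) := by ring
    rw [h3]
    omega
  apply List.ext_getElem?
  intro q
  by_cases hq : q < N.toNat
  · rw [pvMark_get N (N.toNat + 1) _ 0 1 (by norm_num) hb q (by simpa using hq)]
    rw [ms_get? _ q hq]
    by_cases hp : q + 1 = 2 ^ pc q
    · rw [if_pos, if_pos hp]
      refine ⟨⟨pc q, ?_, Nat.zero_le _, hp⟩, by omega⟩
      have : pc q < 2 ^ pc q := Nat.lt_two_pow_self
      omega
    · rw [if_neg, if_neg hp]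
      · simp [hq]
      rintro ⟨⟨s, _, _, hqs⟩, -⟩
      exact hp ((pow_iff q).mp ⟨s, hqs⟩)
  · have h1 : (pvMark N (List.replicate N.toNat none) 1 (N.toNat + 1)).length ≤ q := by
      rw [pvMark_length]; simp; omega
    have h2 : (ms N.toNat).length ≤ q := by rw [ms_length]; omega
    rw [List.getElem?_eq_none h1, List.getElem?_eq_none h2]

lemma Aloop (data : String) (n : Nat) :
    (List.range n).foldl
      (fun (s : Int × Int × List Char) (k : Nat) =>
        (fun (s : Int × Int × List Char) i =>
          if i = 2 ^ s.1.toNat then (s.1 + 1, s.2.1, s.2.2 ++ ['0'])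
          else (s.1, s.2.1 + 1, s.2.2 ++ [(PySem.Str.pyGet? data (-1 * s.2.1)).getD ' ']))
          s (1 + (k : Int)))
      (0, 1, ([] : List Char))
    = (((pc n : Nat) : Int), (n : Int) + 1 - ((pc n : Nat) : Int), pvFill data (ms n) 1) := by
  induction n with
  | zero => simp [pc, ms, pvFill]
  | succ n ih =>
    rw [List.range_succ, List.foldl_append, ih]
    simp only [List.foldl_cons, List.foldl_nil]
    have htn : (((pc n : Nat) : Int)).toNat = pc n := Int.toNat_natCast _
    have hcond : ((1 + (n : Int)) = 2 ^ (((pc n : Nat) : Int)).toNat) ↔ (n + 1 = 2 ^ pc n) := by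
      rw [htn]
      constructor
      · intro h
        have : ((n + 1 : Nat) : Int) = ((2 ^ pc n : Nat) : Int) := by push_cast; omega
        exact_mod_cast this
      · intro h
        have : ((n + 1 : Nat) : Int) = ((2 ^ pc n : Nat) : Int) := by exact_mod_cast congrArg (Nat.cast : Nat → Int) h
        push_cast at this
        omega
    by_cases h : n + 1 = 2 ^ pc n
    · rw [if_pos (hcond.mpr h)]
      have hpc : pc (n + 1) = pc n + 1 := by simp [pc, h]
      have hms : ms (n + 1) = ms n ++ [some '0'] := by simp [ms, h]
      rw [hpc, hms, fill_append_some]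
      refine Prod.ext ?_ (Prod.ext ?_ rfl) <;> push_cast <;> ring
    · rw [if_neg (fun hc => h (hcond.mp hc))]
      have hpc : pc (n + 1) = pc n := by simp [pc, h]
      have hms : ms (n + 1) = ms n ++ [none] := by simp [ms, h]
      rw [hpc, hms, fill_append_none, ms_count]
      have hk : (-1 * ((n : Int) + 1 - ((pc n : Nat) : Int)))
          = -(1 + (((n - pc n : Nat) : Nat) : Int)) := by
        have := pc_le n
        push_cast [Nat.cast_sub this]
        ring
      rw [hk]
      refine Prod.ext ?_ (Prod.ext ?_ rfl) <;> push_cast <;> ring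

lemma main_eq (data : String) (r : Int) :
    possible_Parity data r = possible_Parity_alt data r := by
  show String.ofList (((PySem.List.pyRange 1 (PySem.Str.len data + r + 1) 1).foldl
      (fun (s : Int × Int × List Char) i =>
        if i = 2 ^ s.1.toNat then (s.1 + 1, s.2.1, s.2.2 ++ ['0'])
        else (s.1, s.2.1 + 1, s.2.2 ++ [(PySem.Str.pyGet? data (-1 * s.2.1)).getD ' ']))
      (0, 1, ([] : List Char))).2.2.reverse)
    = String.ofList ((pvFill data (pvMark (PySem.Str.len data + r)
        (List.replicate (PySem.Str.len data + r).toNat none) 1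
        ((PySem.Str.len data + r).toNat + 1)) 1).reverse)
  rw [PySem.List.pyRange_one, show (PySem.Str.len data + r + 1 - 1) = PySem.Str.len data + r from by ring]
  rw [List.foldl_map]
  rw [Aloop data ((PySem.Str.len data + r).toNat)]
  rw [mark_eq_ms (PySem.Str.len data + r)]

-- ===== VERDICT (by name: the statement is the Claim_ definition above) =====
theorem possible_Parity_spec : Claim_equal_possible_Parity := by
  intro data r _ _
  show possible_Parity data r = possible_Parity_alt data r
  exact main_eq data r
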